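-- pv_equiv track=rewrite | github.com/pianowow/projecteuler | 243/243.py | gen_powers
-- ===== SOURCE A (Python) =====
-- def gen_powers(powrange, maxlen, pows):
--   if (len(pows) == maxlen):
--     yield pows
--   elif (len(pows) == 0):
--     for it in powrange:
--       for lst in gen_powers(powrange, maxlen, [it]):
--         yield lst
--   else:
--     for it in [x for x in powrange if x>=pows[0]]:
--       for lst in gen_powers(powrange, maxlen, [it]+pows):
--         yield lst
-- ===== SOURCE B (Python) =====
-- def gen_powers(powrange, maxlen, pows):
--     # Iterative DFS with an explicit stack instead of nested recursive generators.
--     stack = [list(pows)]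
--     while stack:
--         state = stack.pop()
--         if len(state) == maxlen:
--             yield state
--         else:
--             if state:
--                 cands = [x for x in powrange if x >= state[0]]
--             else:
--                 cands = list(powrange)
--             for x in reversed(cands):
--                 stack.append([x] + state)
-- ===== Notes on version B (the rewrite author's own statement) =====
-- stated objective: alternative
-- what changed: Replaced the nested recursive generators with an iterative depth-first search over an explicit LIFO stack of partial sequences, pushing candidate extensions in reverse so the original yield order is preserved.
import Mathlib
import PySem

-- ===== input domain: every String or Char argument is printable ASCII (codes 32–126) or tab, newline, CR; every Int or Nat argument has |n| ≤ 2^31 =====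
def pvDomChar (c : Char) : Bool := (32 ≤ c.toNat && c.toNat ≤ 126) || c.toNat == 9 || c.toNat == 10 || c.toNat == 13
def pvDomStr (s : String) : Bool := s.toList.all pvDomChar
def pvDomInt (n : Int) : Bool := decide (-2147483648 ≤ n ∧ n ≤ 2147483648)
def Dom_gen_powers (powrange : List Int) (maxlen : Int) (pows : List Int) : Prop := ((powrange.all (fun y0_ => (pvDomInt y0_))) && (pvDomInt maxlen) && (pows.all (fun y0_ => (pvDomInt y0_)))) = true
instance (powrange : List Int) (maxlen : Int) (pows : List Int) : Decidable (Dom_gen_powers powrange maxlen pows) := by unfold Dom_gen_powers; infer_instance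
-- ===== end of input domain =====

-- B replaces the nested recursive generators by an explicit-stack iterative DFS (alternative decomposition, same cost).
-- Both ports list the generator fully; Pre_ excludes the inputs on which the Python generator never terminates.

-- ===== PORT A =====
-- literal transliteration of A's recursive generator; the fuel argument only makes the
-- recursion structurally terminating (it is large enough on every input in Pre_)
def genPowA (powrange : List Int) (maxlen : Int) : Nat → List Int → List (List Int)
  | 0, _ => []
  | fuel + 1, pows =>
    if (pows.length : Int) = maxlen then [pows]
    else
      match pows with
      | [] => powrange.flatMap (fun it => genPowA powrange maxlen fuel [it])
      | h :: _ =>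
        (powrange.filter (fun x => decide (h ≤ x))).flatMap
          (fun it => genPowA powrange maxlen fuel (it :: pows))

def gen_powers (powrange : List Int) (maxlen : Int) (pows : List Int) : List (List Int) :=
  genPowA powrange maxlen ((maxlen - pows.length).toNat + 1) pows

-- ===== PORT B =====
-- literal transliteration of B's stack loop; fuel bounds the number of pops (enough on Pre_)
-- candidate next elements for a partial sequence (B's `cands`)
def candsOf (powrange : List Int) (state : List Int) : List Int :=
  match state with
  | [] => powrange
  | h :: _ => powrange.filter (fun x => decide (h ≤ x))

def genPowB (powrange : List Int) (maxlen : Int) : Nat → List (List Int) → List (List Int) → List (List Int)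
  | 0, _, acc => acc.reverse
  | fuel + 1, stack, acc =>
    match stack with
    | [] => acc.reverse
    | state :: rest =>
      if (state.length : Int) = maxlen then
        genPowB powrange maxlen fuel rest (state :: acc)
      else
        -- "for x in reversed(cands): stack.append([x]+state)"
        genPowB powrange maxlen fuel
          (((candsOf powrange state).reverse.map (fun x => x :: state)).foldl
            (fun st e => e :: st) rest) acc

def gen_powers_alt (powrange : List Int) (maxlen : Int) (pows : List Int) : List (List Int) :=
  genPowB powrange maxlen ((powrange.length + 1) ^ ((maxlen - pows.length).toNat + 1)) [pows] []

-- ===== PRECONDITION & SPEC =====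
-- Pre_ excludes exactly the inputs on which A's generator recurses forever (never yields nor
-- stops): len(pows) > maxlen with some element of powrange able to extend pows indefinitely.
def Pre_gen_powers (powrange : List Int) (maxlen : Int) (pows : List Int) : Prop :=
  (pows.length : Int) ≤ maxlen ∨ (pows = [] ∧ powrange = []) ∨
    (pows ≠ [] ∧ ∀ x ∈ powrange, x < pows.headI)
instance (powrange : List Int) (maxlen : Int) (pows : List Int) : Decidable (Pre_gen_powers powrange maxlen pows) := by unfold Pre_gen_powers; infer_instance

def pvWitness_gen_powers : List Int × Int × List Int := ([2, 3, 5], 2, [])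

def Spec_gen_powers (powrange : List Int) (maxlen : Int) (pows : List Int) (out : List (List Int)) : Prop := out = gen_powers_alt powrange maxlen pows
instance (powrange : List Int) (maxlen : Int) (pows : List Int) (out : List (List Int)) : Decidable (Spec_gen_powers powrange maxlen pows out) := by unfold Spec_gen_powers; infer_instance

-- ===== CLAIM (what is proved, stated in full; the proofs are below) =====
def Claim_equal_gen_powers : Prop := ∀ (powrange : List Int) (maxlen : Int) (pows : List Int), Dom_gen_powers powrange maxlen pows → Pre_gen_powers powrange maxlen pows → Spec_gen_powers powrange maxlen pows (gen_powers powrange maxlen pows)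

-- ===== LEMMAS AND PROOFS =====

-- pushing a list element by element onto a stack = reverse-append
theorem foldl_push {α : Type} (L rest : List α) :
    L.foldl (fun st e => e :: st) rest = L.reverse ++ rest := by
  induction L generalizing rest with
  | nil => simp
  | cons a t ih => simp [List.foldl, ih]

-- fuel bound for one stack entry
def powCost (powrange : List Int) (maxlen : Int) (s : List Int) : Nat :=
  (powrange.length + 1) ^ ((maxlen - s.length).toNat + 1)

theorem one_le_powCost (powrange : List Int) (maxlen : Int) (s : List Int) :
    1 ≤ powCost powrange maxlen s :=
  Nat.one_le_pow _ _ (Nat.succ_pos _)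

-- B's stack loop computes, entry by entry, what A computes on each stack entry
theorem genPowB_nil (powrange : List Int) (maxlen : Int) (fuel : Nat) (acc : List (List Int)) :
    genPowB powrange maxlen fuel [] acc = acc.reverse := by
  cases fuel <;> simp [genPowB]

theorem genPowB_spec (powrange : List Int) (maxlen : Int) :
    ∀ (fuel : Nat) (stack acc : List (List Int)),
      (∀ s ∈ stack, (s.length : Int) ≤ maxlen) →
      (stack.map (powCost powrange maxlen)).sum ≤ fuel →
      genPowB powrange maxlen fuel stack acc =
        acc.reverse ++ stack.flatMap
          (fun s => genPowA powrange maxlen ((maxlen - s.length).toNat + 1) s) := by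
  intro fuel
  induction fuel with
  | zero =>
    intro stack acc hlen hsum
    cases stack with
    | nil => simp [genPowB]
    | cons s rest =>
      exfalso
      have h1 := one_le_powCost powrange maxlen s
      simp only [List.map_cons, List.sum_cons] at hsum
      omega
  | succ fuel ih =>
    intro stack acc hlen hsum
    cases stack with
    | nil => simp [genPowB]
    | cons state rest =>
      have hstate : (state.length : Int) ≤ maxlen := hlen state (by simp)
      simp only [List.map_cons, List.sum_cons] at hsum
      by_cases heq : (state.length : Int) = maxlen
      · -- yield case
        have hsum' : (rest.map (powCost powrange maxlen)).sum ≤ fuel := by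
          have h1 := one_le_powCost powrange maxlen state
          omega
        have hrec := ih rest (state :: acc) (fun s hs => hlen s (by simp [hs])) hsum'
        simp only [genPowB, heq, if_pos]
        rw [hrec]
        have hA : genPowA powrange maxlen ((maxlen - state.length).toNat + 1) state = [state] := by
          simp [genPowA, heq]
        rw [List.flatMap_cons, hA]
        simp only [List.reverse_cons, List.append_assoc, List.cons_append, List.nil_append]
      · -- expand case
        have hlt : (state.length : Int) < maxlen := lt_of_le_of_ne hstate heq
        have hclen : (candsOf powrange state).length ≤ powrange.length := by
          cases state with
          | nil => simp [candsOf]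
          | cons h t => exact List.length_filter_le _ _
        set X : Nat := (powrange.length + 1) ^ (maxlen - state.length).toNat with hX
        have h1X : 1 ≤ X := Nat.one_le_pow _ _ (Nat.succ_pos _)
        -- the new stack after the pushes
        have hstack :
            ((candsOf powrange state).reverse.map (fun x => x :: state)).foldl (fun st e => e :: st) rest
              = (candsOf powrange state).map (fun x => x :: state) ++ rest := by
          rw [foldl_push]; simp
        -- fuel accounting
        have hchild : ∀ x : Int, powCost powrange maxlen (x :: state) = X := by
          intro x
          simp only [powCost, hX, List.length_cons]
          congr 1
          push_cast
          omega
        have hsumchild :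
            (((candsOf powrange state).map (fun x => x :: state)).map (powCost powrange maxlen)).sum
              = (candsOf powrange state).length * X := by
          rw [List.map_map]
          have hfun : (powCost powrange maxlen ∘ fun x => x :: state) = fun _ => X := by
            funext x; exact hchild x
          rw [hfun, List.map_const', List.sum_replicate, smul_eq_mul]
        have hcost : powCost powrange maxlen state = (powrange.length + 1) * X := by
          simp only [powCost, hX]
          rw [pow_succ']
        have hmul : (candsOf powrange state).length * X ≤ powrange.length * X := Nat.mul_le_mul hclen (le_refl X)
        have hsum' :
            (((candsOf powrange state).map (fun x => x :: state) ++ rest).map (powCost powrange maxlen)).sum ≤ fuel := by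
          simp only [List.map_append, List.sum_append, hsumchild]
          rw [hcost] at hsum
          have hexp : (powrange.length + 1) * X = powrange.length * X + X := by ring
          omega
        have hmem : ∀ s ∈ (candsOf powrange state).map (fun x => x :: state) ++ rest, (s.length : Int) ≤ maxlen := by
          intro s hs
          rcases List.mem_append.mp hs with hs | hs
          · rcases List.mem_map.mp hs with ⟨x, _, rfl⟩
            simp only [List.length_cons]
            push_cast; omega
          · exact hlen s (by simp [hs])
        have hIH := ih ((candsOf powrange state).map (fun x => x :: state) ++ rest) acc hmem hsum'
        simp only [genPowB, heq, if_neg, not_false_iff]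
        rw [hstack, hIH]
        -- now compare with A's unfolding on `state`
        have hA : genPowA powrange maxlen ((maxlen - state.length).toNat + 1) state
            = (candsOf powrange state).flatMap
                (fun it => genPowA powrange maxlen (maxlen - (state.length : Int)).toNat (it :: state)) := by
          cases state with
          | nil => simp only [genPowA, candsOf, heq, if_neg, not_false_iff]
          | cons h t => simp only [genPowA, candsOf, heq, if_neg, not_false_iff]
        have hchildfuel : ∀ x : Int,
            genPowA powrange maxlen (maxlen - (state.length : Int)).toNat (x :: state)
              = genPowA powrange maxlen ((maxlen - ((x :: state).length : Int)).toNat + 1) (x :: state) := by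
          intro x
          congr 1
          simp only [List.length_cons]
          push_cast
          omega
        rw [List.flatMap_cons, List.flatMap_append, hA, List.flatMap_map]
        congr 1
        congr 1
        exact List.flatMap_congr (fun x _ => (hchildfuel x).symm)

theorem genPowB_step_noCands (powrange : List Int) (maxlen : Int) (fuel : Nat)
    (state : List Int) (rest acc : List (List Int))
    (hne : ¬ ((state.length : Int) = maxlen)) (hc : candsOf powrange state = []) :
    genPowB powrange maxlen (fuel + 1) (state :: rest) acc =
      genPowB powrange maxlen fuel rest acc := by
  simp [genPowB, hne, hc]

theorem filter_lt_head_nil (powrange : List Int) (h : Int)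
    (hub : ∀ x ∈ powrange, x < h) :
    powrange.filter (fun x => decide (h ≤ x)) = [] := by
  rw [List.filter_eq_nil_iff]
  intro x hx
  simpa using not_le.mpr (hub x hx)

-- ===== VERDICT (by name: the statement is the Claim_ definition above) =====
theorem gen_powers_spec : Claim_equal_gen_powers := by
  intro powrange maxlen pows _hdom hpre
  unfold Spec_gen_powers gen_powers gen_powers_alt
  by_cases hle : (pows.length : Int) ≤ maxlen
  · -- terminating main case: len(pows) ≤ maxlen
    rw [genPowB_spec powrange maxlen _ [pows] []
        (by intro s hs; simp only [List.mem_singleton] at hs; subst hs; exact hle)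
        (by simp [powCost])]
    simp
  · rcases hpre with h | ⟨hpows, hpr⟩ | ⟨hne, hub⟩
    · exact absurd h hle
    · -- pows = [] and powrange = [] with maxlen ≠ 0 (so maxlen < 0)
      subst hpows; subst hpr
      simp only [List.length_nil, Nat.cast_zero, not_le] at hle
      have h0 : ¬ ((0 : Int) = maxlen) := by omega
      have hfuel : ((([] : List Int)).length + 1) ^
          ((maxlen - ((([] : List Int)).length : Int)).toNat + 1) = 0 + 1 := by
        simp
      rw [hfuel, genPowB_step_noCands _ _ _ _ _ _ (by simpa using h0) rfl, genPowB_nil]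
      simp [genPowA, h0]
    · -- len(pows) > maxlen, but nothing in powrange can extend pows
      cases pows with
      | nil => exact absurd rfl hne
      | cons h t =>
        have hub' : ∀ x ∈ powrange, x < h := by simpa using hub
        have hne' : ¬ (((h :: t).length : Int) = maxlen) := fun hc => hle (le_of_eq hc)
        have hf : (maxlen - (((h :: t).length : Int))).toNat = 0 := by
          simp only [List.length_cons, not_le] at hle ⊢
          push_cast
          omega
        have hcnil : candsOf powrange (h :: t) = [] := by
          simp only [candsOf]
          exact filter_lt_head_nil powrange h hub'
        simp only [hf, zero_add, pow_one]
        rw [genPowB_step_noCands _ _ _ _ _ _ hne' hcnil, genPowB_nil]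
        have hne2 : ¬ ((t.length : Int) + 1 = maxlen) := fun hc =>
          hne' (by simp only [List.length_cons]; push_cast; omega)
        simp [genPowA, hne2, filter_lt_head_nil powrange h hub']
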